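-- pv_equiv track=rewrite | github.com/mpgossage/advent2024 | day09.py | compress_sparse
-- ===== SOURCE A (Python) =====
-- def compress_sparse(sparse):
--     "compresses the sparse array and returns it"
--     while "." in sparse:
--         idx = sparse.index(".")
--         v = sparse.pop(-1)
--         sparse[idx] = v
--         while sparse[-1] == ".":
--             sparse.pop(-1)
--     return sparse
-- ===== SOURCE B (Python) =====
-- def compress_sparse(sparse):
--     "compresses the sparse array and returns it (single fill pass; mutates sparse in place like the original)"
--     k = sum(1 for x in sparse if x != ".")
--     fills = (x for x in reversed(sparse) if x != ".")
--     out = [x if x != "." else next(fills) for x in sparse[:k]]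
--     sparse[:] = out
--     return sparse
-- ===== Notes on version B (the rewrite author's own statement) =====
-- stated objective: alternative
-- what changed: Replaces the repeated index()/pop()/trailing-strip list-rewriting loop by a single left-to-right fill pass: count the non-dot values, build the reversed stream of non-dot values once, and fill the first k slots, taking fill values from that stream.
-- crash fix: A raises IndexError on nonempty all-dot lists and on lists whose only '.' is the final element; B returns the compacted list (the non-dot values in order) there. — e.g. on compress_sparse(["a", "."]): A raises IndexError, B returns ["a"]
import Mathlib
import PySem

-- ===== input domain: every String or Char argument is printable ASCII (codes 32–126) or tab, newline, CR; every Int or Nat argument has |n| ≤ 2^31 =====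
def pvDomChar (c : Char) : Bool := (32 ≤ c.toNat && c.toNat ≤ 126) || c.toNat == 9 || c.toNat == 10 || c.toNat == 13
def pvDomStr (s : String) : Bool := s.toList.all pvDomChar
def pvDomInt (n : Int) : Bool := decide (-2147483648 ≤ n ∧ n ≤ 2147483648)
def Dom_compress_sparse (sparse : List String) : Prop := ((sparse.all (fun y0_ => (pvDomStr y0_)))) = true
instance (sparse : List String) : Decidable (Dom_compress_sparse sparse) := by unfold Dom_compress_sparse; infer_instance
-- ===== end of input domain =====

-- B replaces A's repeated index()/pop()/trailing-strip rewriting loop by a single left-to-right fill pass (alternative algorithm);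
-- both A and B mutate `sparse` in place in Python — the equivalence proved here is about the return value.


-- ===== PORT A =====
-- inner loop `while sparse[-1] == ".": sparse.pop(-1)` (on the empty list Python would raise; excluded by Pre_)
def pvStrip (l : List String) : List String :=
  if PySem.List.pyGet? l (-1) = some "." then pvStrip l.dropLast else l
termination_by l.length
decreasing_by
  rename_i h
  have hne : l ≠ [] := by intro e; subst e; simp [PySem.List.pyGet?] at h
  have := List.length_pos_iff.mpr hne
  simp [List.length_dropLast]; omega

-- termination helper for the outer loop (cited by decreasing_by only)
theorem pvStrip_length_le (l : List String) : (pvStrip l).length ≤ l.length := by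
  fun_induction pvStrip l with
  | case1 l h ih =>
      have hne : l ≠ [] := by intro e; subst e; simp [PySem.List.pyGet?] at h
      have := List.length_pos_iff.mpr hne
      have := List.length_dropLast (xs := l)
      omega
  | case2 l h => exact le_refl _

def compress_sparse (sparse : List String) : List String :=
  if _hmem : "." ∈ sparse then
    match _hp : PySem.List.pop? sparse (-1) with
    | none => sparse        -- unreachable: sparse is nonempty here
    | some (v, rest) =>
        let idx : Nat := (PySem.List.index? sparse ".").getD 0
        compress_sparse (pvStrip (PySem.List.pySetD rest (idx : Int) v))
  else sparse
termination_by sparse.length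
decreasing_by
  have h1 := pvStrip_length_le (PySem.List.pySetD rest (((PySem.List.index? sparse ".").getD 0 : Nat) : Int) v)
  have h2 := PySem.List.length_pySetD rest (((PySem.List.index? sparse ".").getD 0 : Nat) : Int) v
  have h3 : rest.length + 1 = sparse.length := by simpa using PySem.List.length_of_pop?_eq_some sparse _hp
  omega

-- ===== PORT B =====
-- `[x if x != "." else next(fills) for x in sparse[:k]]`: fill dots from the pool, left to right
def pvFill : List String → List String → List String
  | [], _ => []
  | x :: xs, pool =>
      if x == "." then
        match pool with
        | [] => x :: pvFill xs []        -- next() on an exhausted pool: unreachable (pool holds all k non-dot values)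
        | p :: ps => p :: pvFill xs ps
      else x :: pvFill xs pool

def compress_sparse_alt (sparse : List String) : List String :=
  let k := sparse.countP (fun x => x != ".")
  pvFill (sparse.take k) (sparse.reverse.filter (fun x => x != "."))

-- ===== PRECONDITION & SPEC =====
-- Pre_ excludes exactly the inputs on which the Python A raises IndexError:
-- nonempty all-dot lists and lists whose only "." is the final element.
def Pre_compress_sparse (sparse : List String) : Prop :=
  "." ∈ sparse → ("." ∈ sparse.dropLast ∧ ∃ x ∈ sparse, x ≠ ".")
instance (sparse : List String) : Decidable (Pre_compress_sparse sparse) := by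
  unfold Pre_compress_sparse; infer_instance

def pvWitness_compress_sparse : List String := ["a", ".", "b"]

-- A raises IndexError on nonempty all-dot lists and on lists whose only "." is the last element;
-- B returns the compacted list (the non-dot values in order) there.
def Raises_compress_sparse (sparse : List String) : Prop :=
  "." ∈ sparse ∧ ("." ∉ sparse.dropLast ∨ ∀ x ∈ sparse, x = ".")
instance (sparse : List String) : Decidable (Raises_compress_sparse sparse) := by
  unfold Raises_compress_sparse; infer_instance
def pvRaiseWitness_compress_sparse : List String := ["a", "."]
def pvRaiseWitnessOut_compress_sparse : List String := ["a"]

def Spec_compress_sparse (sparse : List String) (out : List String) : Prop := out = compress_sparse_alt sparse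
instance (sparse : List String) (out : List String) : Decidable (Spec_compress_sparse sparse out) := by unfold Spec_compress_sparse; infer_instance

-- ===== CLAIM (what is proved, stated in full; the proofs are below) =====
def Claim_equal_compress_sparse : Prop := ∀ (sparse : List String), Dom_compress_sparse sparse → Pre_compress_sparse sparse → Spec_compress_sparse sparse (compress_sparse sparse)
def Claim_raises_compress_sparse : Prop := (∀ (sparse : List String), Dom_compress_sparse sparse → Raises_compress_sparse sparse → ¬ Pre_compress_sparse sparse) ∧ (Dom_compress_sparse (pvRaiseWitness_compress_sparse) ∧ Raises_compress_sparse (pvRaiseWitness_compress_sparse) ∧ compress_sparse_alt (pvRaiseWitness_compress_sparse) = pvRaiseWitnessOut_compress_sparse)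

-- ===== LEMMAS AND PROOFS =====

-- appending a trailing "." does not change B's value
theorem alt_append_dot (l : List String) :
    compress_sparse_alt (l ++ ["."]) = compress_sparse_alt l := by
  have hk : l.countP (fun x => x != ".") ≤ l.length := List.countP_le_length
  simp [compress_sparse_alt, List.take_append_of_le_length hk]

theorem alt_strip (l : List String) :
    compress_sparse_alt (pvStrip l) = compress_sparse_alt l := by
  fun_induction pvStrip l with
  | case1 l h ih =>
      have hne : l ≠ [] := by intro e; subst e; simp [PySem.List.pyGet?] at h
      rw [PySem.List.pyGet?_neg_one] at h
      have hlast : l.getLast hne = "." := List.getLast_eq_iff_getLast?_eq_some hne |>.mpr h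
      have hdecomp : l.dropLast ++ ["."] = l := by
        conv_rhs => rw [← List.dropLast_concat_getLast hne]
        rw [hlast]
      rw [ih]
      conv_rhs => rw [← hdecomp]
      rw [alt_append_dot]
  | case2 l h => rfl

-- pvFill passes a dot-free prefix through, pool untouched
theorem fill_nodot_prefix (xs ys pool : List String) (h : "." ∉ xs) :
    pvFill (xs ++ ys) pool = xs ++ pvFill ys pool := by
  induction xs with
  | nil => rfl
  | cons x xs ih =>
      have hx : (x == ".") = false := by
        simp only [beq_eq_false_iff_ne]; intro e; exact h (by simp [e])
      simp [pvFill, hx, ih (fun hm => h (List.mem_cons_of_mem _ hm))]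

theorem fill_nodot (xs pool : List String) (h : "." ∉ xs) : pvFill xs pool = xs := by
  have := fill_nodot_prefix xs [] pool h
  simpa [pvFill] using this

-- pvFill only reads as many pool elements as there are dots
theorem fill_pool_congr (xs p r r' : List String)
    (h : xs.countP (fun x => x == ".") ≤ p.length) :
    pvFill xs (p ++ r) = pvFill xs (p ++ r') := by
  induction xs generalizing p with
  | nil => rfl
  | cons x xs ih =>
      by_cases hx : x = "."
      · subst hx
        have hc : xs.countP (fun x => x == ".") + 1 ≤ p.length := by
          simpa [List.countP_cons] using h
        match p with
        | [] => simp at hc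
        | q :: qs =>
            simp only [List.cons_append, pvFill, beq_self_eq_true, if_pos]
            rw [ih qs (by simpa using hc)]
      · have hx' : (x == ".") = false := beq_eq_false_iff_ne.mpr hx
        simp only [pvFill, hx', Bool.false_eq_true, if_false]
        rw [ih p (by simpa [hx'] using h)]

theorem pvFill_cons_nondot (x : String) (xs pool : List String) (h : (x == ".") = false) :
    pvFill (x :: xs) pool = x :: pvFill xs pool := by simp [pvFill, h]

theorem pvFill_cons_dot_cons (xs ps : List String) (p : String) :
    pvFill ("." :: xs) (p :: ps) = p :: pvFill xs ps := by simp [pvFill]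

theorem alt_nodot (l : List String) (h : "." ∉ l) : compress_sparse_alt l = l := by
  have hk : l.countP (fun x => x != ".") = l.length := by
    rw [List.countP_eq_length]
    intro x hx
    simp only [bne_iff_ne, ne_eq]
    intro e; exact h (e ▸ hx)
  simp [compress_sparse_alt, hk, fill_nodot _ _ h]

theorem set_mid (P Q : List String) (a v : String) :
    (P ++ a :: Q).set P.length v = P ++ v :: Q := by
  induction P with
  | nil => rfl
  | cons p P ih => simp [ih]

theorem take_len_add (P T : List String) (n : Nat) :
    (P ++ T).take (P.length + n) = P ++ T.take n :=
  List.take_length_add_append n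

-- the crux: moving the trailing value v into the first dot gap does not change B's value
theorem step_ne (P Q : List String) (v : String) (hP : "." ∉ P) (hv : v ≠ ".") :
    compress_sparse_alt (P ++ v :: Q) = compress_sparse_alt (P ++ "." :: (Q ++ [v])) := by
  have hvb : (v != ".") = true := by simpa using hv
  have hkP : P.countP (fun x => x != ".") = P.length := by
    rw [List.countP_eq_length]
    intro x hx
    simp only [bne_iff_ne, ne_eq]
    intro e; exact hP (e ▸ hx)
  have hfP : P.reverse.filter (fun x => x != ".") = P.reverse := by
    rw [List.filter_eq_self]
    intro x hx
    simp only [bne_iff_ne, ne_eq]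
    intro e; exact hP (e ▸ (List.mem_reverse.mp hx))
  set kQ := Q.countP (fun x => x != ".") with hkQ
  have hkQle : kQ ≤ Q.length := List.countP_le_length
  -- lengths of the two countP's
  have hcL : (P ++ v :: Q).countP (fun x => x != ".") = P.length + (1 + kQ) := by
    simp [List.countP_append, hkP, hvb, ← hkQ]; omega
  have hcR : (P ++ "." :: (Q ++ [v])).countP (fun x => x != ".") = P.length + (1 + kQ) := by
    simp [List.countP_append, hkP, hvb, ← hkQ]; omega
  have hdots : (Q.take kQ).countP (fun x => x == ".") ≤ kQ :=
    le_trans List.countP_le_length (List.length_take_le kQ Q)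
  have hlenfQ : (Q.reverse.filter (fun x => x != ".")).length = kQ := by
    rw [← List.countP_eq_length_filter, List.countP_reverse]
  -- unfold both sides
  simp only [compress_sparse_alt, hcL, hcR, take_len_add]
  have htakeR : ("." :: (Q ++ [v])).take (1 + kQ) = "." :: Q.take kQ := by
    have : (Q ++ [v]).take kQ = Q.take kQ := List.take_append_of_le_length hkQle
    simp [Nat.add_comm 1 kQ, this]
  have htakeL : (v :: Q).take (1 + kQ) = v :: Q.take kQ := by
    simp [Nat.add_comm 1 kQ]
  rw [htakeR, htakeL]
  have hpoolL : (P ++ v :: Q).reverse.filter (fun x => x != ".") =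
      (Q.reverse.filter (fun x => x != ".") ++ [v]) ++ P.reverse := by
    simp [List.reverse_append, List.filter_append, hfP, hvb]
  have hpoolR : (P ++ "." :: (Q ++ [v])).reverse.filter (fun x => x != ".") =
      v :: (Q.reverse.filter (fun x => x != ".") ++ P.reverse) := by
    simp [List.reverse_append, List.filter_append, hfP, hvb]
  rw [hpoolL, hpoolR]
  rw [fill_nodot_prefix _ _ _ hP, fill_nodot_prefix _ _ _ hP]
  have hvb' : (v == ".") = false := beq_eq_false_iff_ne.mpr hv
  rw [pvFill_cons_nondot _ _ _ hvb', pvFill_cons_dot_cons]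
  rw [List.append_assoc]
  exact congrArg (fun t => P ++ v :: t) (fill_pool_congr _ _ _ _ (by rw [hlenfQ]; exact hdots))

theorem main_eq (l : List String) : compress_sparse l = compress_sparse_alt l := by
  fun_induction compress_sparse l with
  | case1 sparse hmem hp =>
      -- pop? = none is impossible on a nonempty list
      exfalso
      have hne : sparse ≠ [] := by intro e; subst e; simp at hmem
      have hsp : sparse.dropLast ++ [sparse.getLast hne] = sparse :=
        List.dropLast_concat_getLast hne
      have : PySem.List.pop? sparse (-1) = some (sparse.getLast hne, sparse.dropLast) := by
        conv_lhs => rw [← hsp]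
        exact PySem.List.pop?_last _ _
      rw [hp] at this; simp at this
  | case2 sparse hmem v rest hp idx ih =>
      rw [ih, alt_strip]
      -- idx = position of the first dot
      obtain ⟨k, hk⟩ := Option.isSome_iff_exists.mp ((PySem.List.index?_isSome_iff (xs := sparse) (v := ".")).mpr hmem)
      obtain ⟨P, T, hdec, hlen, hPno⟩ := (PySem.List.index?_eq_some_iff sparse "." k).mp hk
      have hidx : idx = P.length := by
        show (PySem.List.index? sparse ".").getD 0 = P.length
        rw [hk, hlen]; rfl
      rw [hidx]
      rcases List.eq_nil_or_concat T with hT | ⟨Q, w, hTQ⟩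
      · -- the first dot is the last element: sparse = P ++ ["."], rest = P, set is out of range
        subst hT
        have hpop : PySem.List.pop? sparse (-1) = some (".", P) := by
          rw [hdec]; exact PySem.List.pop?_last _ _
        rw [hp] at hpop
        obtain ⟨hv, hrest⟩ : v = "." ∧ rest = P := by
          simpa [Prod.ext_iff] using hpop
        have hsetnone : PySem.List.pySet? rest ((P.length : Nat) : Int) v = none := by
          rw [PySem.List.pySet?_eq_none_iff, hrest]
          intro hir
          rcases hir with ⟨_, h2⟩
          omega
        have hset : PySem.List.pySetD rest ((P.length : Nat) : Int) v = rest := by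
          simp [PySem.List.pySetD, hsetnone]
        rw [hset, hrest, hdec, alt_append_dot]
      · -- sparse = (P ++ "." :: Q) ++ [w]; v = w, rest = P ++ "." :: Q
        have hdec' : sparse = (P ++ "." :: Q) ++ [w] := by rw [hdec, hTQ]; simp
        have hpop : PySem.List.pop? sparse (-1) = some (w, P ++ "." :: Q) := by
          rw [hdec']; exact PySem.List.pop?_last _ _
        rw [hp] at hpop
        obtain ⟨hv, hrest⟩ : v = w ∧ rest = P ++ "." :: Q := by
          simpa [Prod.ext_iff] using hpop
        subst hv
        have hset : PySem.List.pySetD rest ((P.length : Nat) : Int) v = P ++ v :: Q := by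
          rw [PySem.List.pySetD_natCast, hrest, set_mid]
        have hassoc : (P ++ "." :: Q) ++ [v] = P ++ "." :: (Q ++ [v]) := by simp
        rw [hset, hdec', hassoc]
        by_cases hw : v = "."
        · rw [hw, ← alt_append_dot (P ++ "." :: Q)]
          congr 1; simp
        · exact step_ne P Q v hPno hw
  | case3 sparse hmem =>
      exact (alt_nodot sparse hmem).symm

-- ===== VERDICT (by name: the statement is the Claim_ definition above) =====
theorem compress_sparse_spec : Claim_equal_compress_sparse := by
  intro sparse _ _
  exact main_eq sparse

theorem compress_sparse_raises : Claim_raises_compress_sparse := by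
  unfold Claim_raises_compress_sparse
  refine ⟨?_, by decide⟩
  intro sparse _ hr hpre
  rcases hr with ⟨hmem, hbad⟩
  rcases hpre hmem with ⟨hdl, x, hx, hxne⟩
  rcases hbad with h | h
  · exact h hdl
  · exact hxne (h x hx)

-- self-check (uses the raises theorem): the raise witness lies in Raises_ and B's port returns the stated value there
theorem pvRaiseWitness_ok :
    Raises_compress_sparse pvRaiseWitness_compress_sparse ∧
    compress_sparse_alt pvRaiseWitness_compress_sparse = pvRaiseWitnessOut_compress_sparse :=
  ⟨compress_sparse_raises.2.2.1, compress_sparse_raises.2.2.2⟩
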